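-- pv_equiv track=rewrite | github.com/xavier150/Blender-For-UnrealEngine-Addons | blender-for-unrealengine/bfu_import_module/import_module_unreal_utils.py | ValidUnrealAssetsName
-- ===== SOURCE A (Python) =====
-- import string
--
-- def ValidUnrealAssetsName(filename):
--     # Normalizes string, removes non-alpha characters
--     # Asset name in Unreal use
--
--     filename = filename.replace('.', '_')
--     filename = filename.replace('(', '_')
--     filename = filename.replace(')', '_')
--     filename = filename.replace(' ', '_')
--     valid_chars = "-_%s%s" % (string.ascii_letters, string.digits)
--     filename = ''.join(c for c in filename if c in valid_chars)
--     return filename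
-- ===== SOURCE B (Python) =====
-- import string
--
-- def ValidUnrealAssetsName(filename):
--     # single pass: map '.', '(', ')', ' ' to '_', keep valid chars, drop the rest
--     valid = set("-_" + string.ascii_letters + string.digits)
--     out = []
--     for c in filename:
--         if c in '.() ':
--             out.append('_')
--         elif c in valid:
--             out.append(c)
--     return ''.join(out)
-- ===== Notes on version B (the rewrite author's own statement) =====
-- stated objective: simpler
-- what changed: Replaces four sequential str.replace passes plus a filtering join (five scans over the string) by a single char-by-char pass that maps the four replaced punctuation characters to underscore, keeps characters from a precomputed valid set and drops the rest.
import Mathlib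
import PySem

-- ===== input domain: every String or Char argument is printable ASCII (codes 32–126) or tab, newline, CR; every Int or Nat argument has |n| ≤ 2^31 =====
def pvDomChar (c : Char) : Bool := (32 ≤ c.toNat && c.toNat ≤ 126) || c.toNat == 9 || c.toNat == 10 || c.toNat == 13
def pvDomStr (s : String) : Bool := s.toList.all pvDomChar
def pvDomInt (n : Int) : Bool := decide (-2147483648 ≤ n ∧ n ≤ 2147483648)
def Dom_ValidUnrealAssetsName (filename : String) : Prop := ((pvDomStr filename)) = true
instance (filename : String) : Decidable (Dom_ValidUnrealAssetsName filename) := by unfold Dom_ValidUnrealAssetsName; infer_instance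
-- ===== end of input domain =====

-- B fuses A's four replace passes and the filtering join into one single pass (objective: simpler).

-- ===== PORT A =====
-- valid_chars = "-_%s%s" % (string.ascii_letters, string.digits)
def pvValidChars : String := "-_abcdefghijklmnopqrstuvwxyzABCDEFGHIJKLMNOPQRSTUVWXYZ0123456789"

def ValidUnrealAssetsName (filename : String) : String :=
  let f1 := PySem.Str.replace filename "." "_"
  let f2 := PySem.Str.replace f1 "(" "_"
  let f3 := PySem.Str.replace f2 ")" "_"
  let f4 := PySem.Str.replace f3 " " "_"
  String.mk (f4.toList.filter (fun c => PySem.Chars.isIn [c] pvValidChars.toList))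

-- ===== PORT B =====
-- B precomputes its valid-char set once (set(...) in Source B)
def pvValidSet : List Char := "-_abcdefghijklmnopqrstuvwxyzABCDEFGHIJKLMNOPQRSTUVWXYZ0123456789".toList

def pvMapChar (c : Char) : Option Char :=
  if ['.', '(', ')', ' '].contains c then some '_'
  else if pvValidSet.contains c then some c
  else none

def ValidUnrealAssetsName_alt (filename : String) : String :=
  String.mk (filename.toList.filterMap pvMapChar)

-- ===== PRECONDITION & SPEC =====
def Spec_ValidUnrealAssetsName (filename : String) (out : String) : Prop := out = ValidUnrealAssetsName_alt filename
instance (filename : String) (out : String) : Decidable (Spec_ValidUnrealAssetsName filename out) := by unfold Spec_ValidUnrealAssetsName; infer_instance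

-- ===== CLAIM (what is proved, stated in full; the proofs are below) =====
def Claim_equal_ValidUnrealAssetsName : Prop := ∀ (filename : String), Dom_ValidUnrealAssetsName filename → Spec_ValidUnrealAssetsName filename (ValidUnrealAssetsName filename)

-- ===== LEMMAS AND PROOFS =====

-- single-character replace is a character-wise map
lemma replace_go_single (a b : Char) :
    ∀ (fuel : Nat) (l acc : List Char), l.length ≤ fuel →
      PySem.Chars.replace.go [a] [b] fuel l acc
        = acc.reverse ++ l.map (fun c => if c = a then b else c) := by
  intro fuel
  induction fuel with
  | zero =>
      intro l acc h
      have : l = [] := List.eq_nil_of_length_eq_zero (Nat.le_zero.mp h)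
      subst this
      simp [PySem.Chars.replace.go]
  | succ n ih =>
      intro l acc h
      cases l with
      | nil => simp [PySem.Chars.replace.go]
      | cons c t =>
          rw [PySem.Chars.replace.go]
          by_cases hc : c = a
          · subst hc
            have hpre : List.isPrefixOf [c] (c :: t) = true := by
              simp [List.isPrefixOf]
            rw [if_pos hpre, ih _ _ (by simpa using Nat.le_of_succ_le_succ h)]
            simp
          · have hpre : List.isPrefixOf [a] (c :: t) = false := by
              simp only [List.isPrefixOf, Bool.and_eq_false_iff]
              left
              simpa using fun h' => hc h'.symm
            rw [if_neg (by simp [hpre]), ih _ _ (Nat.le_of_succ_le_succ h)]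
            simp [hc]

lemma replace_single (a b : Char) (l : List Char) :
    PySem.Chars.replace l [a] [b] = l.map (fun c => if c = a then b else c) := by
  have h : ([a] : List Char).isEmpty = false := rfl
  simp only [PySem.Chars.replace, h]
  simpa using replace_go_single a b l.length l [] le_rfl

lemma isIn_single (c : Char) (s : List Char) :
    PySem.Chars.isIn [c] s = s.contains c := by
  by_cases h : c ∈ s
  · have h1 : PySem.Chars.isIn [c] s = true := by
      rw [PySem.Chars.isIn_iff_infix]
      rcases List.append_of_mem h with ⟨u, v, rfl⟩
      exact ⟨u, v, by simp⟩
    have h2 : s.contains c = true := by simpa using h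
    rw [h1, h2]
  · have h1 : PySem.Chars.isIn [c] s = false := by
      rw [PySem.Chars.isIn_eq_false_iff]
      intro hin
      exact h (hin.subset (by simp))
    have h2 : s.contains c = false := by simpa using h
    rw [h1, h2]

-- the composed four-fold substitution
def pvSubst (c : Char) : Char :=
  if c = '.' ∨ c = '(' ∨ c = ')' ∨ c = ' ' then '_' else c

lemma maps_compose (l : List Char) :
    (((l.map (fun c => if c = '.' then '_' else c)).map
        (fun c => if c = '(' then '_' else c)).map
        (fun c => if c = ')' then '_' else c)).map
        (fun c => if c = ' ' then '_' else c) = l.map pvSubst := by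
  simp only [List.map_map]
  apply List.map_congr_left
  intro c _
  simp only [Function.comp, pvSubst]
  by_cases h1 : c = '.' <;> by_cases h2 : c = '(' <;> by_cases h3 : c = ')' <;>
    by_cases h4 : c = ' ' <;> simp_all

lemma filter_map_eq_filterMap (l : List Char) :
    (l.map pvSubst).filter (fun c => pvValidChars.toList.contains c)
      = l.filterMap pvMapChar := by
  have hu : (decide ('_' ∈ pvValidChars.toList)) = true := by decide
  induction l with
  | nil => rfl
  | cons c t ih =>
      have ih' : List.filter (fun c => decide (c ∈ pvValidChars.toList)) (List.map pvSubst t)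
          = List.filterMap pvMapChar t := by simpa using ih
      simp only [List.map_cons, List.filter_cons, List.filterMap_cons]
      by_cases h4 : ['.', '(', ')', ' '].contains c
      · have hc : c = '.' ∨ c = '(' ∨ c = ')' ∨ c = ' ' := by simpa using h4
        have hs : pvSubst c = '_' := by
          rcases hc with h | h | h | h <;> simp [pvSubst, h]
        have hm : pvMapChar c = some '_' := by rcases hc with h | h | h | h <;> subst h <;> rfl
        simp [hs, hm, hu, ih']
      · have hs : pvSubst c = c := by
          have hc : ¬ (c = '.' ∨ c = '(' ∨ c = ')' ∨ c = ' ') := by simpa using h4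
          simp [pvSubst, hc]
        by_cases h5 : pvValidChars.toList.contains c
        · have hmem : c ∈ pvValidChars.toList := by simpa using h5
          have hm : pvMapChar c = some c := by unfold pvMapChar; rw [if_neg (by simpa using h4), if_pos (by simpa using h5)]
          simp [hs, hm, hmem, ih']
        · have hmem : c ∉ pvValidChars.toList := by simpa using h5
          have hm : pvMapChar c = none := by unfold pvMapChar; rw [if_neg (by simpa using h4), if_neg (by simpa using h5)]
          simp [hs, hm, hmem, ih']

lemma filter_pred_swap (l : List Char) :
    l.filter (fun c => PySem.Chars.isIn [c] pvValidChars.toList)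
      = l.filter (fun c => pvValidChars.toList.contains c) := by
  apply List.filter_congr
  intro c _
  exact isIn_single c pvValidChars.toList

theorem ValidUnrealAssetsName_spec : Claim_equal_ValidUnrealAssetsName := by
  intro filename _
  simp only [Spec_ValidUnrealAssetsName, ValidUnrealAssetsName, ValidUnrealAssetsName_alt]
  simp only [PySem.Str.toList_replace,
    show (".").toList = ['.'] from rfl, show ("(").toList = ['('] from rfl,
    show (")").toList = [')'] from rfl, show (" ").toList = [' '] from rfl,
    show ("_").toList = ['_'] from rfl]
  rw [replace_single, replace_single, replace_single, replace_single, maps_compose]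
  congr 1
  rw [filter_pred_swap, filter_map_eq_filterMap]
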